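-- pv_equiv track=rewrite | github.com/mattiatomeo/adventofcode2021 | day2/distance.py | find_position_1
-- ===== SOURCE A (Python) =====
-- def find_position_1(movements):
--     horizontal = 0
--     depth = 0
--
--     for direction, amount in movements:
--         if direction == "forward":
--             horizontal += amount
--         elif direction == "down":
--             depth += amount
--         else:  # "up"
--             depth -= amount
--
--     return horizontal * depth
-- ===== SOURCE B (Python) =====
-- def find_position_1(movements):
--     totals = {}
--     for direction, amount in movements:
--         totals[direction] = totals.get(direction, 0) + amount
--     horizontal = totals.get("forward", 0)
--     depth = sum(v if k == "down" else -v for k, v in totals.items() if k != "forward")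
--     return horizontal * depth
-- ===== Notes on version B (the rewrite author's own statement) =====
-- stated objective: alternative
-- what changed: B replaces A's single branching two-accumulator pass by a hash aggregation: it groups amounts per direction key into a dict, then computes horizontal and depth from the per-direction totals.
import Mathlib
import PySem

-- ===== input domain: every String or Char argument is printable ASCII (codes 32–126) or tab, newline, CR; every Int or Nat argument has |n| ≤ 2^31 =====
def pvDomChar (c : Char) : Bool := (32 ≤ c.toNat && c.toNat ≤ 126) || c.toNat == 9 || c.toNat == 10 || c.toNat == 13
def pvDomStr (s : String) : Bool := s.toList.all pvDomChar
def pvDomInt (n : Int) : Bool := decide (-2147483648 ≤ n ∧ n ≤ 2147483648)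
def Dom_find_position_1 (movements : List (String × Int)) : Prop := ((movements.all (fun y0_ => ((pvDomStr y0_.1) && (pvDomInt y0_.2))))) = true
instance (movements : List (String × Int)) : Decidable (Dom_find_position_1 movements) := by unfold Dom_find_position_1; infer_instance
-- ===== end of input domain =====

-- B replaces A's single branching two-accumulator pass by a dict aggregation: it groups amounts per direction key and then reads horizontal and depth off the per-direction totals (alternative decomposition, same cost).
-- ===== PORT A =====
def find_position_1 (movements : List (String × Int)) : Int :=
  let st := movements.foldl
    (fun (p : Int × Int) dir_amt =>
      let direction := dir_amt.1
      let amount := dir_amt.2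
      if direction == "forward" then (p.1 + amount, p.2)
      else if direction == "down" then (p.1, p.2 + amount)
      else (p.1, p.2 - amount))
    (0, 0)
  st.1 * st.2

-- ===== PORT B =====
def find_position_1_alt (movements : List (String × Int)) : Int :=
  let totals := movements.foldl
    (fun (d : PySem.Dict String Int) m => d.insert m.1 (d.getD m.1 0 + m.2))
    PySem.Dict.empty
  let horizontal := totals.getD "forward" 0
  let depth := ((totals.items.filter (fun p => p.1 != "forward")).map
      (fun p => if p.1 == "down" then p.2 else -p.2)).sum
  horizontal * depth

-- ===== PRECONDITION & SPEC =====
def Spec_find_position_1 (movements : List (String × Int)) (out : Int) : Prop := out = find_position_1_alt movements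
instance (movements : List (String × Int)) (out : Int) : Decidable (Spec_find_position_1 movements out) := by unfold Spec_find_position_1; infer_instance

-- ===== CLAIM (what is proved, stated in full; the proofs are below) =====
def Claim_equal_find_position_1 : Prop := ∀ (movements : List (String × Int)), Dom_find_position_1 movements → Spec_find_position_1 movements (find_position_1 movements)

-- ===== LEMMAS AND PROOFS =====

-- weight of one dict item toward A's depth accumulator (0 for "forward" items)
def pvW (p : String × Int) : Int :=
  if p.1 == "forward" then 0 else if p.1 == "down" then p.2 else -p.2

theorem pvW_add (k : String) (a b : Int) : pvW (k, a + b) = pvW (k, a) + pvW (k, b) := by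
  unfold pvW
  split_ifs <;> ring

-- replacing the unique item with key k changes the weighted sum by the weight difference
theorem sum_map_replace (l : List (String × Int)) (k : String) (v old : Int)
    (hn : (l.map Prod.fst).Nodup) (hold : (k, old) ∈ l) :
    ((l.map (fun p => if p.1 == k then (k, v) else p)).map pvW).sum
      = (l.map pvW).sum - pvW (k, old) + pvW (k, v) := by
  induction l with
  | nil => simp at hold
  | cons p tl ih =>
    simp only [List.map_cons, List.nodup_cons] at hn
    by_cases hp : p.1 = k
    · have htl : ∀ q ∈ tl, ¬ (q.1 = k) := by
        intro q hq hqk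
        exact hn.1 (by rw [hp, ← hqk]; exact List.mem_map_of_mem hq)
      have hmap : tl.map (fun q => if q.1 == k then (k, v) else q) = tl := by
        have h1 : tl.map (fun q => if q.1 == k then (k, v) else q) = tl.map id :=
          List.map_congr_left fun q hq => by simp [htl q hq]
        rw [h1, List.map_id]
      have hpold : p = (k, old) := by
        rcases List.mem_cons.mp hold with h | h
        · exact h.symm
        · exact absurd rfl (htl _ h)
      simp only [List.map_cons, List.sum_cons, hmap]
      rw [hpold]
      simp
      ring
    · have hold' : (k, old) ∈ tl := by
        rcases List.mem_cons.mp hold with h | h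
        · exact absurd (by rw [← h]) hp
        · exact h
      have hp' : ¬ (p.1 == k) = true := by simpa using hp
      simp only [List.map_cons, List.sum_cons]
      rw [if_neg hp', ih hn.2 hold']
      ring

-- one dict update totals[k] = totals.get(k,0) + a shifts the weighted item sum by pvW (k, a)
theorem sum_w_insert (t : PySem.Dict String Int) (ht : t.keys.Nodup) (k : String) (a : Int) :
    (((t.insert k (t.getD k 0 + a)).items).map pvW).sum = ((t.items).map pvW).sum + pvW (k, a) := by
  by_cases hc : t.contains k
  · obtain ⟨v, hv⟩ : ∃ v, t.get? k = some v := by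
      have h := PySem.Dict.contains_eq_isSome_get? t k
      rw [h] at hc
      exact Option.isSome_iff_exists.mp hc
    have hmem : (k, v) ∈ t.items := PySem.Dict.mem_items_of_get?_eq_some t hv
    have hgd : t.getD k 0 = v := PySem.Dict.getD_of_get?_eq_some t 0 hv
    rw [PySem.Dict.items_insert_of_contains t _ hc,
        sum_map_replace t.items k _ v (by simpa [PySem.Dict.keys] using ht) hmem, hgd, pvW_add]
    ring
  · rw [PySem.Dict.items_insert_of_not_contains t _ (by simpa using hc),
        PySem.Dict.getD_of_not_contains t 0 (by simpa using hc)]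
    simp

-- invariant: A's loop started at (H t, D t) lands at (H t', D t') where t' is B's dict fold from t
theorem fold_inv (ms : List (String × Int)) (t : PySem.Dict String Int) (ht : t.keys.Nodup) :
    ms.foldl
      (fun (p : Int × Int) dir_amt =>
        let direction := dir_amt.1
        let amount := dir_amt.2
        if direction == "forward" then (p.1 + amount, p.2)
        else if direction == "down" then (p.1, p.2 + amount)
        else (p.1, p.2 - amount))
      (t.getD "forward" 0, ((t.items).map pvW).sum)
    = ((ms.foldl (fun (d : PySem.Dict String Int) m => d.insert m.1 (d.getD m.1 0 + m.2)) t).getD "forward" 0,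
       (((ms.foldl (fun (d : PySem.Dict String Int) m => d.insert m.1 (d.getD m.1 0 + m.2)) t).items).map pvW).sum) := by
  induction ms generalizing t with
  | nil => simp
  | cons m tl ih =>
    have ht' : (t.insert m.1 (t.getD m.1 0 + m.2)).keys.Nodup := PySem.Dict.nodup_keys_insert _ _ _ ht
    have hstep :
        (let direction := m.1
         let amount := m.2
         if direction == "forward" then (t.getD "forward" 0 + amount, ((t.items).map pvW).sum)
         else if direction == "down" then (t.getD "forward" 0, ((t.items).map pvW).sum + amount)
         else (t.getD "forward" 0, ((t.items).map pvW).sum - amount))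
        = ((t.insert m.1 (t.getD m.1 0 + m.2)).getD "forward" 0,
           (((t.insert m.1 (t.getD m.1 0 + m.2)).items).map pvW).sum) := by
      rw [sum_w_insert t ht m.1 m.2, PySem.Dict.getD_insert]
      unfold pvW
      by_cases h1 : m.1 == "forward"
      · have heq : "forward" = m.1 := by simpa using (beq_iff_eq.mp h1).symm
        simp [heq]
      · have hne : ¬ ("forward" = m.1) := fun h => h1 (by simp [h])
        by_cases h2 : m.1 == "down"
        · simp [h1, h2, hne]
        · simp [h1, h2, hne]
          ring_nf
    simp only [List.foldl_cons]
    rw [hstep]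
    exact ih (t.insert m.1 (t.getD m.1 0 + m.2)) ht'

-- B's filtered depth sum equals the total weighted item sum (forward items weigh 0)
theorem filter_sum_eq (l : List (String × Int)) :
    ((l.filter (fun p => p.1 != "forward")).map
      (fun p => if p.1 == "down" then p.2 else -p.2)).sum = (l.map pvW).sum := by
  induction l with
  | nil => rfl
  | cons p tl ih =>
    have ih' : (List.map (fun q => if q.1 = "down" then q.2 else -q.2)
        (List.filter (fun q => q.1 != "forward") tl)).sum = (List.map pvW tl).sum := by
      simpa using ih
    by_cases h : p.1 = "forward"
    · simp [h, pvW, ih']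
    · simp [h, pvW, ih']

-- ===== VERDICT (by name: the statement is the Claim_ definition above) =====
theorem find_position_1_spec : Claim_equal_find_position_1 := by
  intro movements _
  unfold Spec_find_position_1
  simp only [find_position_1, find_position_1_alt]
  rw [filter_sum_eq]
  have h0 : ((0 : Int), (0 : Int))
      = ((PySem.Dict.empty : PySem.Dict String Int).getD "forward" 0,
         (((PySem.Dict.empty : PySem.Dict String Int).items).map pvW).sum) := by
    simp [PySem.Dict.getD_empty]
    rfl
  rw [h0, fold_inv movements PySem.Dict.empty PySem.Dict.nodup_keys_empty]
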